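-- pv_equiv track=rewrite | github.com/Ikarus65698/telegram-bot | text_formation.py | take_parametr
-- ===== SOURCE A (Python) =====
-- def take_parametr(string):
--
--     x_str = []
--     y_str = []
--     flag = True
--
--     for i in string:
--
--         if (i == '='):
--             flag = False
--             continue
--
--         if (flag) and (i != ' '):
--             x_str.append(i)
--             continue
--
--         if (not flag) and (i != ' '):
--             y_str.append(i)
--
--     new_x_str = ''.join(x_str).lower()
--     new_y_str = ''.join(y_str).lower()
--
--     return [new_x_str, new_y_str]
-- ===== SOURCE B (Python) =====
-- def take_parametr(string):
--     head, _sep, tail = string.partition('=')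
--     x = head.replace(' ', '').lower()
--     y = tail.replace(' ', '').replace('=', '').lower()
--     return [x, y]
-- ===== Notes on version B (the rewrite author's own statement) =====
-- stated objective: idiomatic
-- what changed: Replaces the flag-driven per-character loop with str.partition at the first separator plus replace/lower string methods (also stripping the later separator occurrences from the tail).
import Mathlib
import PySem

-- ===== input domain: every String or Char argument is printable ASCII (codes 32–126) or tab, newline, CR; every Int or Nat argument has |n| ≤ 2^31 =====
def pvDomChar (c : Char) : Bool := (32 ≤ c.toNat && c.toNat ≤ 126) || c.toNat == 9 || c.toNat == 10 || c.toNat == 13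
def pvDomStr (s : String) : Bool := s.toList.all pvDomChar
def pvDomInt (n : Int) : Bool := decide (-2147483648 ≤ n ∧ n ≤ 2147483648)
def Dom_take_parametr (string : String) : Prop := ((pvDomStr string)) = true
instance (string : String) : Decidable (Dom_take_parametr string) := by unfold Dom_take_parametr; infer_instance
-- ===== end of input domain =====

-- B replaces A's flag-driven per-character loop by partition at the first separator plus replace/lower string methods (idiomatic; measured faster by a constant factor).

-- ===== PORT A =====
-- the body of A's for-loop over the characters, acting on the state (x_str, y_str, flag)
def takeStep (st : List Char × List Char × Bool) (i : Char) : List Char × List Char × Bool :=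
  if i == '=' then (st.1, st.2.1, false)
  else if st.2.2 && (i != ' ') then (st.1 ++ [i], st.2.1, st.2.2)
  else if (!st.2.2) && (i != ' ') then (st.1, st.2.1 ++ [i], st.2.2)
  else st

def take_parametr (string : String) : List String :=
  let st := string.toList.foldl takeStep ([], [], true)
  [String.ofList (PySem.Chars.lower st.1), String.ofList (PySem.Chars.lower st.2.1)]

-- ===== PORT B =====
-- hand port of str.partition(sep) (CPython: index of the first occurrence via find, then slices);
-- exact for nonempty sep — Source B only calls it with sep = "="
def pyPartition (s : String) (sep : String) : String × String × String :=
  let i := PySem.Chars.find s.toList sep.toList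
  if i < 0 then (s, "", "")
  else (String.ofList (s.toList.take i.toNat), sep,
        String.ofList (s.toList.drop (i.toNat + sep.toList.length)))

def take_parametr_alt (string : String) : List String :=
  let p := pyPartition string "="
  let x := PySem.Str.lower (PySem.Str.replace p.1 " " "")
  let y := PySem.Str.lower (PySem.Str.replace (PySem.Str.replace p.2.2 " " "") "=" "")
  [x, y]

-- ===== PRECONDITION & SPEC =====
def Spec_take_parametr (string : String) (out : List String) : Prop := out = take_parametr_alt string
instance (string : String) (out : List String) : Decidable (Spec_take_parametr string out) := by unfold Spec_take_parametr; infer_instance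

-- ===== CLAIM (what is proved, stated in full; the proofs are below) =====
def Claim_equal_take_parametr : Prop := ∀ (string : String), Dom_take_parametr string → Spec_take_parametr string (take_parametr string)

-- ===== LEMMAS AND PROOFS =====

-- A's loop after the first '=' has been seen: everything except ' ' and '=' goes to y_str
theorem foldl_takeStep_false (l : List Char) (xs ys : List Char) :
    l.foldl takeStep (xs, ys, false) =
      (xs, ys ++ l.filter (fun c => c != '=' && c != ' '), false) := by
  induction l generalizing ys with
  | nil => simp
  | cons c t ih =>
    by_cases hc1 : c = '=' <;> by_cases hc2 : c = ' ' <;>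
      simp_all [takeStep, List.foldl_cons]

-- A's loop from the initial state, characterised by takeWhile/dropWhile at the first '='
theorem foldl_takeStep_true (l : List Char) (xs ys : List Char) :
    l.foldl takeStep (xs, ys, true) =
      (xs ++ (l.takeWhile (· != '=')).filter (· != ' '),
       ys ++ ((l.dropWhile (· != '=')).tail).filter (fun c => c != '=' && c != ' '),
       l.all (· != '=')) := by
  induction l generalizing xs with
  | nil => simp
  | cons c t ih =>
    by_cases hc1 : c = '='
    · subst hc1
      simp [takeStep, List.foldl_cons, foldl_takeStep_false]
    · by_cases hc2 : c = ' ' <;>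
        simp_all [takeStep, List.foldl_cons]

-- s.replace(c, '') removes every occurrence of the single character c
theorem replace_go_single (c : Char) :
    ∀ (fuel : Nat) (l acc : List Char), l.length ≤ fuel →
      PySem.Chars.replace.go [c] [] fuel l acc = acc.reverse ++ l.filter (· != c) := by
  intro fuel
  induction fuel with
  | zero =>
    intro l acc h
    have : l = [] := List.eq_nil_of_length_eq_zero (Nat.le_zero.mp h)
    subst this; simp [PySem.Chars.replace.go]
  | succ n ih =>
    intro l acc h
    cases l with
    | nil => simp [PySem.Chars.replace.go]
    | cons c' t =>
      rw [PySem.Chars.replace.go]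
      by_cases hc : c = c'
      · subst hc
        simp only [List.isPrefixOf, beq_self_eq_true, Bool.true_and, if_true,
          List.filter_cons, bne_self_eq_false]
        exact ih t acc (by simpa using Nat.le_of_succ_le_succ h)
      · have hb : ([c].isPrefixOf (c' :: t)) = false := by
          simp [List.isPrefixOf, hc]
        rw [hb]
        simp only [Bool.false_eq_true, if_false, List.filter_cons]
        have hbne : (c' != c) = true := by simp [bne]; exact fun h' => hc h'.symm
        rw [hbne]
        rw [ih t (c' :: acc) (by simpa using Nat.le_of_succ_le_succ h)]
        simp

theorem replace_single (c : Char) (l : List Char) :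
    PySem.Chars.replace l [c] [] = l.filter (· != c) := by
  unfold PySem.Chars.replace
  simp only [List.isEmpty_cons, Bool.false_eq_true, if_false]
  simpa using replace_go_single c l.length l [] (le_refl _)

-- [a] is a prefix of t iff t starts with a
theorem singleton_prefix_iff_head? (a : Char) (t : List Char) :
    [a] <+: t ↔ t.head? = some a := by
  cases t with
  | nil => simp
  | cons b t' => simp [List.cons_prefix_iff, eq_comm]

-- filtering out ' ' and then '=' is one filter
theorem filter_space_eq (t : List Char) :
    (t.filter (· != ' ')).filter (· != '=') = t.filter (fun c => c != '=' && c != ' ') := by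
  induction t with
  | nil => rfl
  | cons c t ih =>
    by_cases hc1 : c = '=' <;> by_cases hc2 : c = ' ' <;>
      simp_all

-- the suffix of l from position (takeWhile p l).length is dropWhile p l
theorem drop_takeWhile_length (p : Char → Bool) (l : List Char) :
    l.drop (l.takeWhile p).length = l.dropWhile p := by
  induction l with
  | nil => rfl
  | cons c t ih =>
    by_cases h : p c <;> simp [h, ih]

-- position of the first '=': find agrees with takeWhile's length
theorem find_eq_takeWhile_length (l : List Char) (hmem : '=' ∈ l) :
    PySem.Chars.find l ['='] = ((l.takeWhile (· != '=')).length : Int) := by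
  have hinf : ['='] <:+: l := (List.singleton_infix_iff '=' l).mpr hmem
  have h0 : (0 : Int) ≤ PySem.Chars.find l ['='] := (PySem.Chars.find_nonneg_iff l ['=']).mpr hinf
  obtain ⟨hpre, hmin⟩ := PySem.Chars.find_spec h0
  set i := (PySem.Chars.find l ['=']).toNat with hidef
  set n := (l.takeWhile (· != '=')).length with hndef
  have hi : l[i]? = some '=' := by
    rw [← List.head?_drop]; exact (singleton_prefix_iff_head? _ _).mp hpre
  have hdwne : l.dropWhile (· != '=') ≠ [] := by
    intro hnil
    have := List.dropWhile_eq_nil_iff.mp hnil '=' hmem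
    simp at this
  have hn : l[n]? = some '=' := by
    rw [← List.head?_drop, drop_takeWhile_length]
    rw [List.head?_eq_some_head hdwne]
    have h := List.head_dropWhile_not (p := (· != '=')) (l := l) hdwne
    simpa using h
  have h1 : i ≤ n := by
    by_contra hlt
    push Not at hlt
    exact hmin n hlt ((singleton_prefix_iff_head? _ _).mpr (by rw [List.head?_drop]; exact hn))
  have h2 : n ≤ i := by
    by_contra hlt
    push Not at hlt
    have hiltn : i < (l.takeWhile (· != '=')).length := hlt
    have hillen : i < l.length := Nat.lt_of_lt_of_le hiltn (List.takeWhile_prefix _).length_le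
    have hge : l[i]'hillen = (l.takeWhile (· != '='))[i]'hiltn :=
      Eq.symm (List.IsPrefix.getElem (List.takeWhile_prefix _) hiltn)
    have hptw := List.mem_takeWhile_imp (List.getElem_mem hiltn)
    rw [← hge] at hptw
    have hieq : l[i]'hillen = '=' := by
      have h := hi
      rw [List.getElem?_eq_getElem hillen] at h
      exact Option.some.inj h
    rw [hieq] at hptw
    simp at hptw
  have : i = n := Nat.le_antisymm h1 h2
  omega

-- ===== VERDICT (by name: the statement is the Claim_ definition above) =====
theorem take_parametr_spec : Claim_equal_take_parametr := by
  intro s _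
  show take_parametr s = take_parametr_alt s
  unfold take_parametr take_parametr_alt pyPartition
  rw [foldl_takeStep_true]
  by_cases hmem : '=' ∈ s.toList
  · rw [show ("=" : String).toList = ['='] from rfl, find_eq_takeWhile_length s.toList hmem]
    set n := (s.toList.takeWhile (· != '=')).length with hndef
    rw [if_neg (by omega : ¬ ((n : Int) < 0))]
    simp only [PySem.Str.lower, PySem.Str.replace, String.toList_ofList, Int.toNat_natCast]
    rw [show (" " : String).toList = [' '] from rfl, show ("" : String).toList = ([] : List Char) from rfl,
      show ("=" : String).toList = ['='] from rfl]
    rw [replace_single, replace_single, replace_single]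
    rw [filter_space_eq]
    have htake : s.toList.take n = s.toList.takeWhile (· != '=') :=
      (List.prefix_iff_eq_take.mp (List.takeWhile_prefix _)).symm
    have hdrop : (s.toList.dropWhile (· != '=')).tail = s.toList.drop (n + 1) := by
      rw [← drop_takeWhile_length (· != '='), List.tail_drop]
    simp [htake, hdrop]
  · have hfind : PySem.Chars.find s.toList ("=" : String).toList = -1 := by
      rw [show ("=" : String).toList = ['='] from rfl]
      exact (PySem.Chars.find_eq_neg_one_iff _ _).mpr
        (fun hinf => hmem ((List.singleton_infix_iff '=' s.toList).mp hinf))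
    rw [hfind, if_pos (by omega : (-1 : Int) < 0)]
    have htw : s.toList.takeWhile (· != '=') = s.toList :=
      List.takeWhile_eq_self_iff.mpr (fun a ha => by simp [bne]; exact fun h => hmem (h ▸ ha))
    have hdw : s.toList.dropWhile (· != '=') = [] :=
      List.dropWhile_eq_nil_iff.mpr (fun a ha => by simp [bne]; exact fun h => hmem (h ▸ ha))
    simp only [PySem.Str.lower, PySem.Str.replace, String.toList_ofList]
    rw [show (" " : String).toList = [' '] from rfl, show ("" : String).toList = ([] : List Char) from rfl,
      show ("=" : String).toList = ['='] from rfl]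
    rw [replace_single, replace_single, replace_single]
    simp [htw, hdw]
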